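-- pv_equiv track=rewrite | github.com/Click-Intelligence-LLC/TigerHill | backend/services/turn_assignment_v2.py | identify_request_response_pairs
-- ===== SOURCE A (Python) =====
-- from typing import Dict, List, Any, Union
--
-- def identify_request_response_pairs(interactions: List[Dict[str, Any]]) -> List[List[Dict[str, Any]]]:
--     """
--     Identify request-response pairs in a turn by timestamp order.
--
--     Returns:
--         List of pairs, each pair is [interaction1, interaction2, ...]
--     """
--     sorted_interactions = sorted(interactions, key=lambda x: x['timestamp'])
--     pairs = []
--     current_pair = []
--
--     for interaction in sorted_interactions:
--         if interaction['type'] == 'request':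
--             if current_pair:
--                 # Previous pair ends, start new one
--                 pairs.append(current_pair)
--                 current_pair = []
--             current_pair.append(interaction)
--         else:  # response
--             current_pair.append(interaction)
--
--     # Add final pair
--     if current_pair:
--         pairs.append(current_pair)
--
--     return pairs
-- ===== SOURCE B (Python) =====
-- def identify_request_response_pairs(interactions):
--     rest = sorted(interactions, key=lambda x: x['timestamp'])
--     res = []
--     while rest:
--         k = 1
--         while k < len(rest) and rest[k]['type'] != 'request':
--             k += 1
--         res.append(rest[:k])
--         rest = rest[k:]
--     return res
-- ===== Notes on version B (the rewrite author's own statement) =====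
-- stated objective: alternative
-- what changed: Replaces A's element-by-element state machine (pairs + current_pair accumulators with conditional flushes) by segment slicing: after sorting, repeatedly scan ahead to the next 'request' boundary and slice off one whole group at a time.
import Mathlib
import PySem

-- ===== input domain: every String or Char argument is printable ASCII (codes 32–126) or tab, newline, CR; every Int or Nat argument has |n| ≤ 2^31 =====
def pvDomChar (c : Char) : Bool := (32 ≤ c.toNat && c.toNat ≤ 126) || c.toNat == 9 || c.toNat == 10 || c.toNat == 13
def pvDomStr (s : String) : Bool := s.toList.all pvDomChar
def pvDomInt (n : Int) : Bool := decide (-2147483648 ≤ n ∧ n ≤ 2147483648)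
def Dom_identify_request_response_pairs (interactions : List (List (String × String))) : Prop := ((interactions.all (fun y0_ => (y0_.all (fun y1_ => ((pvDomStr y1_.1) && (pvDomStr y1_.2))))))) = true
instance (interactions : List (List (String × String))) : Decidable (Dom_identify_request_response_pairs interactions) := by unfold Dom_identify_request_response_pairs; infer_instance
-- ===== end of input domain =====

-- B replaces A's element-by-element state machine by whole-segment slicing at 'request'
-- boundaries (alternative decomposition, same cost); return value only, no mutation.

-- ===== PORT A =====
-- one step of A's for-loop over (pairs, current_pair)
def aStep (st : List (List (List (String × String))) × List (List (String × String)))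
    (x : List (String × String)) :
    List (List (List (String × String))) × List (List (String × String)) :=
  if PySem.Dict.getD (PySem.Dict.ofList x) "type" "" = "request" then
    if st.2 ≠ [] then (st.1 ++ [st.2], [x]) else (st.1, st.2 ++ [x])
  else (st.1, st.2 ++ [x])

def identify_request_response_pairs (interactions : List (List (String × String))) : List (List (List (String × String))) :=
  let sorted_interactions := PySem.List.sorted interactions (fun x => PySem.Dict.getD (PySem.Dict.ofList x) "timestamp" "") false
  let st := sorted_interactions.foldl aStep ([], [])
  st.1 ++ (if st.2 ≠ [] then [st.2] else [])

-- ===== PORT B =====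
-- Source B's outer while loop: slice off one segment [rest[0]] ++ (responses up to next request)
def bLoop (rest : List (List (String × String))) (res : List (List (List (String × String)))) : List (List (List (String × String))) :=
  match rest with
  | [] => res
  | x :: t =>
    -- inner while: k-1 = number of leading non-'request' elements of t, so rest[:k] = x :: seg
    let seg := t.takeWhile (fun y => PySem.Dict.getD (PySem.Dict.ofList y) "type" "" != "request")
    bLoop (t.drop seg.length) (res ++ [x :: seg])
termination_by rest.length
decreasing_by simp

def identify_request_response_pairs_alt (interactions : List (List (String × String))) : List (List (List (String × String))) :=
  bLoop (PySem.List.sorted interactions (fun x => PySem.Dict.getD (PySem.Dict.ofList x) "timestamp" "") false) []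

-- ===== PRECONDITION & SPEC =====
-- Pre_ excludes exactly the inputs where the Python A raises KeyError: some interaction
-- lacks the 'timestamp' or 'type' key.
def Pre_identify_request_response_pairs (interactions : List (List (String × String))) : Prop :=
  interactions.all (fun d => PySem.Dict.contains (PySem.Dict.ofList d) "timestamp" && PySem.Dict.contains (PySem.Dict.ofList d) "type") = true
instance (interactions : List (List (String × String))) : Decidable (Pre_identify_request_response_pairs interactions) := by unfold Pre_identify_request_response_pairs; infer_instance

def pvWitness_identify_request_response_pairs : (List (List (String × String))) :=
  [[("timestamp", "1"), ("type", "request")], [("timestamp", "2"), ("type", "response")]]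

def Spec_identify_request_response_pairs (interactions : List (List (String × String))) (out : List (List (List (String × String)))) : Prop := out = identify_request_response_pairs_alt interactions
instance (interactions : List (List (String × String))) (out : List (List (List (String × String)))) : Decidable (Spec_identify_request_response_pairs interactions out) := by unfold Spec_identify_request_response_pairs; infer_instance

-- ===== CLAIM (what is proved, stated in full; the proofs are below) =====
def Claim_equal_identify_request_response_pairs : Prop := ∀ (interactions : List (List (String × String))), Dom_identify_request_response_pairs interactions → Pre_identify_request_response_pairs interactions → Spec_identify_request_response_pairs interactions (identify_request_response_pairs interactions)

-- ===== LEMMAS AND PROOFS =====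

-- finalize A's loop state
def aFin (st : List (List (List (String × String))) × List (List (String × String))) : List (List (List (String × String))) :=
  st.1 ++ (if st.2 ≠ [] then [st.2] else [])

lemma drop_length_takeWhile {α : Type} (p : α → Bool) (t : List α) :
    t.drop (t.takeWhile p).length = t.dropWhile p := by
  induction t with
  | nil => rfl
  | cons a t ih => by_cases h : p a <;> simp [List.takeWhile, List.dropWhile, h, ih]

lemma bLoop_nil (res : List (List (List (String × String)))) : bLoop [] res = res := by
  rw [bLoop.eq_def]

lemma bLoop_cons (x : List (String × String)) (t : List (List (String × String)))
    (res : List (List (List (String × String)))) :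
    bLoop (x :: t) res =
      bLoop (t.dropWhile (fun y => PySem.Dict.getD (PySem.Dict.ofList y) "type" "" != "request"))
        (res ++ [x :: t.takeWhile (fun y => PySem.Dict.getD (PySem.Dict.ofList y) "type" "" != "request")]) := by
  rw [bLoop.eq_def]
  simp [drop_length_takeWhile]

-- res is a pure accumulator of bLoop
lemma bLoop_acc (rest : List (List (String × String))) (res : List (List (List (String × String)))) :
    bLoop rest res = res ++ bLoop rest [] := by
  match rest with
  | [] => simp [bLoop_nil]
  | x :: t =>
    rw [bLoop_cons, bLoop_cons]
    rw [bLoop_acc (t.dropWhile _) (res ++ [x :: _]), bLoop_acc (t.dropWhile _) ([] ++ [x :: _])]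
    simp
termination_by rest.length
decreasing_by
  all_goals
    have h := List.length_dropWhile_le (p := fun y => PySem.Dict.getD (PySem.Dict.ofList y) "type" "" != "request") (l := t)
    simp only [List.length_cons]
    omega

-- A's pairs list is a pure accumulator too
lemma aLoop_acc (xs : List (List (String × String))) (pairs : List (List (List (String × String)))) (cur : List (List (String × String))) :
    xs.foldl aStep (pairs, cur) =
      (pairs ++ (xs.foldl aStep ([], cur)).1, (xs.foldl aStep ([], cur)).2) := by
  induction xs generalizing pairs cur with
  | nil => simp
  | cons x xs ih =>
    simp only [List.foldl_cons]
    by_cases hr : PySem.Dict.getD (PySem.Dict.ofList x) "type" "" = "request"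
    · by_cases hc : cur = []
      · have h1 : aStep (pairs, cur) x = (pairs, cur ++ [x]) := by simp [aStep, hr, hc]
        have h2 : aStep ([], cur) x = ([], cur ++ [x]) := by simp [aStep, hr, hc]
        rw [h1, h2, ih pairs (cur ++ [x])]
      · have h1 : aStep (pairs, cur) x = (pairs ++ [cur], [x]) := by simp [aStep, hr, hc]
        have h2 : aStep ([], cur) x = ([cur], [x]) := by simp [aStep, hr, hc]
        rw [h1, h2, ih (pairs ++ [cur]) [x], ih [cur] [x]]
        simp
    · have h1 : ∀ p, aStep (p, cur) x = (p, cur ++ [x]) := by intro p; simp [aStep, hr]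
      rw [h1, h1, ih pairs (cur ++ [x])]

-- the key invariant: a running non-empty current_pair absorbs responses up to the next 'request'
lemma aLoop_seg (xs : List (List (String × String))) (c : List (List (String × String))) (hc : c ≠ []) :
    aFin (xs.foldl aStep ([], c)) =
      (c ++ xs.takeWhile (fun y => PySem.Dict.getD (PySem.Dict.ofList y) "type" "" != "request")) ::
        bLoop (xs.dropWhile (fun y => PySem.Dict.getD (PySem.Dict.ofList y) "type" "" != "request")) [] := by
  induction xs generalizing c with
  | nil => simp [aFin, hc, bLoop_nil]
  | cons x xs ih =>
    by_cases hr : PySem.Dict.getD (PySem.Dict.ofList x) "type" "" = "request"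
    · have hpx : (PySem.Dict.getD (PySem.Dict.ofList x) "type" "" != "request") = false := by
        simp [bne, hr]
      have h1 : aStep ([], c) x = ([c], [x]) := by simp [aStep, hr, hc]
      rw [List.foldl_cons, h1, List.takeWhile_cons, List.dropWhile_cons]
      rw [show ([c] : List (List (List (String × String)))) = [] ++ [c] from rfl, aLoop_acc xs ([] ++ [c]) [x]]
      have h2 : aFin ([] ++ [c] ++ (xs.foldl aStep ([], [x])).1, (xs.foldl aStep ([], [x])).2)
          = [c] ++ aFin (xs.foldl aStep ([], [x])) := by simp [aFin]
      rw [h2, ih [x] (by simp), hpx]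
      simp only [Bool.false_eq_true, if_false]
      rw [bLoop_cons, bLoop_acc _ ([] ++ [x :: _])]
      simp
    · have hpx : (PySem.Dict.getD (PySem.Dict.ofList x) "type" "" != "request") = true := by
        simp [bne, hr]
      have h1 : aStep ([], c) x = ([], c ++ [x]) := by simp [aStep, hr]
      rw [List.foldl_cons, h1, List.takeWhile_cons, List.dropWhile_cons, hpx]
      rw [ih (c ++ [x]) (by simp)]
      simp

-- ===== VERDICT (by name: the statement is the Claim_ definition above) =====
theorem identify_request_response_pairs_spec : Claim_equal_identify_request_response_pairs := by
  intro interactions _ _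
  unfold Spec_identify_request_response_pairs identify_request_response_pairs identify_request_response_pairs_alt
  generalize PySem.List.sorted interactions (fun x => PySem.Dict.getD (PySem.Dict.ofList x) "timestamp" "") false = s
  match s with
  | [] => simp [bLoop_nil]
  | x :: t =>
    have h0 : aStep ([], []) x = ([], [x]) := by
      by_cases hr : PySem.Dict.getD (PySem.Dict.ofList x) "type" "" = "request" <;> simp [aStep, hr]
    show aFin ((x :: t).foldl aStep ([], [])) = bLoop (x :: t) []
    rw [List.foldl_cons, h0, aLoop_seg t [x] (by simp), bLoop_cons, bLoop_acc _ ([] ++ [x :: _])]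
    simp
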